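-- pv_equiv track=rewrite | github.com/Ramavadhoota/Resume_Analyzer_Chatbot_Scout | utils.py | get_tech_stack_categories
-- ===== SOURCE A (Python) =====
-- from typing import Dict, List, Any, Optional
-- from typing import Dict, List, Any, Optional
--
-- def get_tech_stack_categories(tech_stack: List[str]) -> Dict[str, List[str]]:
--     """Categorize tech stack by type"""
--     categories = {
--         "Programming Languages": [],
--         "Frameworks": [],
--         "Databases": [],
--         "Cloud Platforms": [],
--         "DevOps Tools": [],
--         "Other": []
--     }
--
--     for tech in tech_stack:
--         if tech in ['python', 'javascript', 'java', 'c++', 'c#', 'php', 'ruby', 'go', 'rust']: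
--             categories["Programming Languages"].append(tech)
--         elif tech in ['react', 'angular', 'vue', 'django', 'flask', 'spring', 'express']:
--             categories["Frameworks"].append(tech)
--         elif tech in ['mysql', 'postgresql', 'mongodb', 'redis']:
--             categories["Databases"].append(tech)
--         elif tech in ['aws', 'azure', 'gcp']:
--             categories["Cloud Platforms"].append(tech)
--         elif tech in ['docker', 'kubernetes', 'jenkins', 'git']:
--             categories["DevOps Tools"].append(tech)
--         else:
--             categories["Other"].append(tech)
--
--     # Remove empty categories
--     return {k: v for k, v in categories.items() if v}
-- ===== SOURCE B (Python) =====
-- _CATEGORY_LISTS = [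
--     ("Programming Languages", ['python', 'javascript', 'java', 'c++', 'c#', 'php', 'ruby', 'go', 'rust']),
--     ("Frameworks", ['react', 'angular', 'vue', 'django', 'flask', 'spring', 'express']),
--     ("Databases", ['mysql', 'postgresql', 'mongodb', 'redis']),
--     ("Cloud Platforms", ['aws', 'azure', 'gcp']),
--     ("DevOps Tools", ['docker', 'kubernetes', 'jenkins', 'git']),
-- ]
--
-- _KNOWN = {t for _, techs in _CATEGORY_LISTS for t in techs}
--
-- def get_tech_stack_categories(tech_stack):
--     """Categorize tech stack by staged per-category filter passes (no bucket dict)."""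
--     result = {}
--     for cat, techs in _CATEGORY_LISTS:
--         hits = [t for t in tech_stack if t in techs]
--         if hits:
--             result[cat] = hits
--     other = [t for t in tech_stack if t not in _KNOWN]
--     if other:
--         result["Other"] = other
--     return result
-- ===== Notes on version B (the rewrite author's own statement) =====
-- stated objective: alternative
-- what changed: Instead of one pass dispatching each item through a five-way if/elif chain into a mutable six-bucket dict and filtering empty buckets afterwards, B makes one filter pass per category (plus a final not-in-any pass for Other), building the nonempty output buckets directly in category order; correctness rests on the category word lists being pairwise disjoint.
import Mathlib
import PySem

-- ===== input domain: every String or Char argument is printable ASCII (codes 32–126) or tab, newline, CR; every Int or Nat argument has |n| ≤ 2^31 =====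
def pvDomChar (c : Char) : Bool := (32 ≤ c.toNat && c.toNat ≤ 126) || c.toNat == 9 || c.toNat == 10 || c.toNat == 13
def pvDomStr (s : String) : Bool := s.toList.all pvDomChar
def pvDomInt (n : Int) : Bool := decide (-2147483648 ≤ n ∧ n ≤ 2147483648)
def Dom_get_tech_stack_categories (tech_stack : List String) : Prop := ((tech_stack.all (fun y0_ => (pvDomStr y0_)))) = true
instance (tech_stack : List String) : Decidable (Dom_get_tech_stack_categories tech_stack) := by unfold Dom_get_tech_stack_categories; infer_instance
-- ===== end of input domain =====

-- B categorizes by staged per-category filter passes over the input (plus a final "not in any" pass for Other),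
-- building the nonempty output buckets directly, instead of A's single pass dispatching each item through an
-- if/elif chain into a mutable six-bucket dict filtered afterwards (alternative decomposition; same cost).

-- ===== PORT A =====
-- the initial six-bucket dict, as in A
def pvInitCats : PySem.Dict String (List String) :=
  PySem.Dict.ofList [("Programming Languages", []), ("Frameworks", []), ("Databases", []),
                     ("Cloud Platforms", []), ("DevOps Tools", []), ("Other", [])]

-- one iteration of A's loop body: the if/elif chain, categories[cat].append(tech)
def pvStepA (d : PySem.Dict String (List String)) (tech : String) : PySem.Dict String (List String) :=
  if tech ∈ ["python", "javascript", "java", "c++", "c#", "php", "ruby", "go", "rust"] then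
    d.modify "Programming Languages" [] (· ++ [tech])
  else if tech ∈ ["react", "angular", "vue", "django", "flask", "spring", "express"] then
    d.modify "Frameworks" [] (· ++ [tech])
  else if tech ∈ ["mysql", "postgresql", "mongodb", "redis"] then
    d.modify "Databases" [] (· ++ [tech])
  else if tech ∈ ["aws", "azure", "gcp"] then
    d.modify "Cloud Platforms" [] (· ++ [tech])
  else if tech ∈ ["docker", "kubernetes", "jenkins", "git"] then
    d.modify "DevOps Tools" [] (· ++ [tech])
  else
    d.modify "Other" [] (· ++ [tech])

def get_tech_stack_categories (tech_stack : List String) : List (String × List String) :=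
  ((tech_stack.foldl pvStepA pvInitCats).items.filter (fun kv => !kv.2.isEmpty))

-- ===== PORT B =====
-- _CATEGORY_LISTS
def pvCatLists : List (String × List String) :=
  [("Programming Languages", ["python", "javascript", "java", "c++", "c#", "php", "ruby", "go", "rust"]),
   ("Frameworks", ["react", "angular", "vue", "django", "flask", "spring", "express"]),
   ("Databases", ["mysql", "postgresql", "mongodb", "redis"]),
   ("Cloud Platforms", ["aws", "azure", "gcp"]),
   ("DevOps Tools", ["docker", "kubernetes", "jenkins", "git"])]

-- _KNOWN = {t for _, techs in _CATEGORY_LISTS for t in techs}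
def pvKnown : PySem.Set String := PySem.Set.ofList (pvCatLists.flatMap (·.2))

-- the for-loop over _CATEGORY_LISTS; result dict is built by inserting fresh distinct keys
-- in order, which as an association list is appending the pair
def get_tech_stack_categories_alt (tech_stack : List String) : List (String × List String) :=
  let result := pvCatLists.foldl
    (fun result p =>
      let hits := tech_stack.filter (fun t => decide (t ∈ p.2))
      if hits.isEmpty then result else result ++ [(p.1, hits)]) []
  let other := tech_stack.filter (fun t => !pvKnown.contains t)
  if other.isEmpty then result else result ++ [("Other", other)]

-- ===== PRECONDITION & SPEC =====
def Spec_get_tech_stack_categories (tech_stack : List String) (out : List (String × List String)) : Prop := out = get_tech_stack_categories_alt tech_stack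
instance (tech_stack : List String) (out : List (String × List String)) : Decidable (Spec_get_tech_stack_categories tech_stack out) := by unfold Spec_get_tech_stack_categories; infer_instance

-- ===== CLAIM (what is proved, stated in full; the proofs are below) =====
def Claim_equal_get_tech_stack_categories : Prop := ∀ (tech_stack : List String), Dom_get_tech_stack_categories tech_stack → Spec_get_tech_stack_categories tech_stack (get_tech_stack_categories tech_stack)

-- ===== LEMMAS AND PROOFS =====
-- the category A's if/elif chain assigns to a string
def pvCatOf (t : String) : String :=
  if t ∈ ["python", "javascript", "java", "c++", "c#", "php", "ruby", "go", "rust"] then "Programming Languages"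
  else if t ∈ ["react", "angular", "vue", "django", "flask", "spring", "express"] then "Frameworks"
  else if t ∈ ["mysql", "postgresql", "mongodb", "redis"] then "Databases"
  else if t ∈ ["aws", "azure", "gcp"] then "Cloud Platforms"
  else if t ∈ ["docker", "kubernetes", "jenkins", "git"] then "DevOps Tools"
  else "Other"

theorem pvStepA_eq (d : PySem.Dict String (List String)) (t : String) :
    pvStepA d t = d.modify (pvCatOf t) [] (· ++ [t]) := by
  unfold pvStepA pvCatOf
  split_ifs <;> rfl

-- the buckets accumulated by A's loop, read via getD
theorem pvFoldA_getD (ts : List String) (c : String) :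
    (ts.foldl pvStepA pvInitCats).getD c [] =
      pvInitCats.getD c [] ++ ts.filter (fun t => pvCatOf t == c) := by
  have h1 : ts.foldl pvStepA pvInitCats
      = (ts.map (fun t => (pvCatOf t, t))).foldl
          (fun d p => d.modify p.1 [] (· ++ [p.2])) pvInitCats := by
    rw [List.foldl_map]
    exact PySem.List.foldl_congr_mem _ _ _ _ (fun d t _ => pvStepA_eq d t)
  rw [h1, PySem.Dict.getD_foldl_modify_append, List.filter_map, List.map_map]
  simp [Function.comp_def]

theorem pvFoldA_keys (ts : List String) :
    (ts.foldl pvStepA pvInitCats).keys = pvInitCats.keys := by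
  have h1 : ts.foldl pvStepA pvInitCats
      = ts.foldl (fun d t => d.modify (pvCatOf t) [] (· ++ [t])) pvInitCats :=
    PySem.List.foldl_congr_mem _ _ _ _ (fun d t _ => pvStepA_eq d t)
  rw [h1, PySem.Dict.keys_foldl_modify_key, PySem.Set.update_eq_append_filter]
  have hmem : ∀ y ∈ PySem.Set.ofList (ts.map pvCatOf), y ∈ pvInitCats.keys := by
    intro y hy
    rw [PySem.Set.mem_ofList, List.mem_map] at hy
    obtain ⟨t, _, rfl⟩ := hy
    unfold pvCatOf
    split_ifs <;> decide
  rw [List.filter_eq_nil_iff.mpr (by intro y hy; simp [hmem y hy]), List.append_nil]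

theorem pvFoldA_items (ts : List String) :
    (ts.foldl pvStepA pvInitCats).items =
      [("Programming Languages", ts.filter (fun t => pvCatOf t == "Programming Languages")),
       ("Frameworks", ts.filter (fun t => pvCatOf t == "Frameworks")),
       ("Databases", ts.filter (fun t => pvCatOf t == "Databases")),
       ("Cloud Platforms", ts.filter (fun t => pvCatOf t == "Cloud Platforms")),
       ("DevOps Tools", ts.filter (fun t => pvCatOf t == "DevOps Tools")),
       ("Other", ts.filter (fun t => pvCatOf t == "Other"))] := by
  have hnd : (ts.foldl pvStepA pvInitCats).keys.Nodup := by
    rw [pvFoldA_keys]; decide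
  rw [PySem.Dict.items_eq_map_keys _ hnd [], pvFoldA_keys]
  have hk : pvInitCats.keys = ["Programming Languages", "Frameworks", "Databases",
      "Cloud Platforms", "DevOps Tools", "Other"] := by decide
  rw [hk]
  simp only [List.map_cons, List.map_nil, pvFoldA_getD]
  norm_num
  decide

-- A's chain assigns category c exactly to the members of c's word list (the lists are pairwise disjoint)
theorem pvContains_PL (t : String) :
    decide (t ∈ ["python", "javascript", "java", "c++", "c#", "php", "ruby", "go", "rust"]) = (pvCatOf t == "Programming Languages") := by
  unfold pvCatOf
  split_ifs with h1 h2 h3 h4 h5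
  · simp only [List.mem_cons, List.not_mem_nil, or_false] at h1
    rcases h1 with rfl|rfl|rfl|rfl|rfl|rfl|rfl|rfl|rfl <;> decide
  · simp only [List.mem_cons, List.not_mem_nil, or_false] at h2
    rcases h2 with rfl|rfl|rfl|rfl|rfl|rfl|rfl <;> decide
  · simp only [List.mem_cons, List.not_mem_nil, or_false] at h3
    rcases h3 with rfl|rfl|rfl|rfl <;> decide
  · simp only [List.mem_cons, List.not_mem_nil, or_false] at h4
    rcases h4 with rfl|rfl|rfl <;> decide
  · simp only [List.mem_cons, List.not_mem_nil, or_false] at h5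
    rcases h5 with rfl|rfl|rfl|rfl <;> decide
  · simp [h1]

theorem pvContains_F (t : String) :
    decide (t ∈ ["react", "angular", "vue", "django", "flask", "spring", "express"]) = (pvCatOf t == "Frameworks") := by
  unfold pvCatOf
  split_ifs with h1 h2 h3 h4 h5
  · simp only [List.mem_cons, List.not_mem_nil, or_false] at h1
    rcases h1 with rfl|rfl|rfl|rfl|rfl|rfl|rfl|rfl|rfl <;> decide
  · simp only [List.mem_cons, List.not_mem_nil, or_false] at h2
    rcases h2 with rfl|rfl|rfl|rfl|rfl|rfl|rfl <;> decide
  · simp only [List.mem_cons, List.not_mem_nil, or_false] at h3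
    rcases h3 with rfl|rfl|rfl|rfl <;> decide
  · simp only [List.mem_cons, List.not_mem_nil, or_false] at h4
    rcases h4 with rfl|rfl|rfl <;> decide
  · simp only [List.mem_cons, List.not_mem_nil, or_false] at h5
    rcases h5 with rfl|rfl|rfl|rfl <;> decide
  · simp [h2]

theorem pvContains_DB (t : String) :
    decide (t ∈ ["mysql", "postgresql", "mongodb", "redis"]) = (pvCatOf t == "Databases") := by
  unfold pvCatOf
  split_ifs with h1 h2 h3 h4 h5
  · simp only [List.mem_cons, List.not_mem_nil, or_false] at h1
    rcases h1 with rfl|rfl|rfl|rfl|rfl|rfl|rfl|rfl|rfl <;> decide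
  · simp only [List.mem_cons, List.not_mem_nil, or_false] at h2
    rcases h2 with rfl|rfl|rfl|rfl|rfl|rfl|rfl <;> decide
  · simp only [List.mem_cons, List.not_mem_nil, or_false] at h3
    rcases h3 with rfl|rfl|rfl|rfl <;> decide
  · simp only [List.mem_cons, List.not_mem_nil, or_false] at h4
    rcases h4 with rfl|rfl|rfl <;> decide
  · simp only [List.mem_cons, List.not_mem_nil, or_false] at h5
    rcases h5 with rfl|rfl|rfl|rfl <;> decide
  · simp [h3]

theorem pvContains_CP (t : String) :
    decide (t ∈ ["aws", "azure", "gcp"]) = (pvCatOf t == "Cloud Platforms") := by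
  unfold pvCatOf
  split_ifs with h1 h2 h3 h4 h5
  · simp only [List.mem_cons, List.not_mem_nil, or_false] at h1
    rcases h1 with rfl|rfl|rfl|rfl|rfl|rfl|rfl|rfl|rfl <;> decide
  · simp only [List.mem_cons, List.not_mem_nil, or_false] at h2
    rcases h2 with rfl|rfl|rfl|rfl|rfl|rfl|rfl <;> decide
  · simp only [List.mem_cons, List.not_mem_nil, or_false] at h3
    rcases h3 with rfl|rfl|rfl|rfl <;> decide
  · simp only [List.mem_cons, List.not_mem_nil, or_false] at h4
    rcases h4 with rfl|rfl|rfl <;> decide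
  · simp only [List.mem_cons, List.not_mem_nil, or_false] at h5
    rcases h5 with rfl|rfl|rfl|rfl <;> decide
  · simp [h4]

theorem pvContains_DO (t : String) :
    decide (t ∈ ["docker", "kubernetes", "jenkins", "git"]) = (pvCatOf t == "DevOps Tools") := by
  unfold pvCatOf
  split_ifs with h1 h2 h3 h4 h5
  · simp only [List.mem_cons, List.not_mem_nil, or_false] at h1
    rcases h1 with rfl|rfl|rfl|rfl|rfl|rfl|rfl|rfl|rfl <;> decide
  · simp only [List.mem_cons, List.not_mem_nil, or_false] at h2
    rcases h2 with rfl|rfl|rfl|rfl|rfl|rfl|rfl <;> decide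
  · simp only [List.mem_cons, List.not_mem_nil, or_false] at h3
    rcases h3 with rfl|rfl|rfl|rfl <;> decide
  · simp only [List.mem_cons, List.not_mem_nil, or_false] at h4
    rcases h4 with rfl|rfl|rfl <;> decide
  · simp only [List.mem_cons, List.not_mem_nil, or_false] at h5
    rcases h5 with rfl|rfl|rfl|rfl <;> decide
  · simp [h5]

-- not in any category word list = assigned "Other"
theorem pvContains_Other (t : String) : (!pvKnown.contains t) = (pvCatOf t == "Other") := by
  unfold pvCatOf
  split_ifs with h1 h2 h3 h4 h5
  · simp only [List.mem_cons, List.not_mem_nil, or_false] at h1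
    rcases h1 with rfl|rfl|rfl|rfl|rfl|rfl|rfl|rfl|rfl <;> decide
  · simp only [List.mem_cons, List.not_mem_nil, or_false] at h2
    rcases h2 with rfl|rfl|rfl|rfl|rfl|rfl|rfl <;> decide
  · simp only [List.mem_cons, List.not_mem_nil, or_false] at h3
    rcases h3 with rfl|rfl|rfl|rfl <;> decide
  · simp only [List.mem_cons, List.not_mem_nil, or_false] at h4
    rcases h4 with rfl|rfl|rfl <;> decide
  · simp only [List.mem_cons, List.not_mem_nil, or_false] at h5
    rcases h5 with rfl|rfl|rfl|rfl <;> decide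
  · cases hb : pvKnown.contains t with
    | false => decide
    | true =>
      exfalso
      have hm : t ∈ pvCatLists.flatMap (·.2) := by
        rw [← PySem.Set.mem_ofList]
        exact (PySem.Set.contains_iff _ _).mp hb
      simp only [pvCatLists, List.flatMap_cons, List.flatMap_nil, List.append_nil,
        List.mem_append, List.mem_cons, List.not_mem_nil, or_false] at hm
      simp only [List.mem_cons, List.not_mem_nil, or_false] at h1 h2 h3 h4 h5
      tauto

-- ===== VERDICT (by name: the statement is the Claim_ definition above) =====
theorem get_tech_stack_categories_spec : Claim_equal_get_tech_stack_categories := by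
  intro ts _
  unfold Spec_get_tech_stack_categories get_tech_stack_categories get_tech_stack_categories_alt
  rw [pvFoldA_items]
  simp only [pvCatLists, List.foldl_cons, List.foldl_nil]
  rw [List.filter_congr (fun t _ => pvContains_PL t),
      List.filter_congr (fun t _ => pvContains_F t),
      List.filter_congr (fun t _ => pvContains_DB t),
      List.filter_congr (fun t _ => pvContains_CP t),
      List.filter_congr (fun t _ => pvContains_DO t),
      List.filter_congr (fun t _ => pvContains_Other t)]
  by_cases h1 : (ts.filter (fun t => pvCatOf t == "Programming Languages")).isEmpty = true <;>
  by_cases h2 : (ts.filter (fun t => pvCatOf t == "Frameworks")).isEmpty = true <;>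
  by_cases h3 : (ts.filter (fun t => pvCatOf t == "Databases")).isEmpty = true <;>
  by_cases h4 : (ts.filter (fun t => pvCatOf t == "Cloud Platforms")).isEmpty = true <;>
  by_cases h5 : (ts.filter (fun t => pvCatOf t == "DevOps Tools")).isEmpty = true <;>
  by_cases h6 : (ts.filter (fun t => pvCatOf t == "Other")).isEmpty = true <;>
    simp [List.filter_nil, h1, h2, h3, h4, h5, h6]
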